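-- pv_equiv track=rewrite | github.com/Hojott/tira | vko11/fliptwo.py | solve
-- ===== SOURCE A (Python) =====
-- import collections
--
-- def solve(n,k):
--     queue = collections.deque(range(1, n+1))
--
--     for i in range(k):
--         n1 = queue.popleft()
--         n2 = queue.popleft()
--
--         queue.append(n2)
--         queue.append(n1)
--
--     return queue.popleft()
-- ===== SOURCE B (Python) =====
-- def solve(n, k):
--     # Closed form: each op rotates the deque by 2 and swaps the moved pair,
--     # so positions cycle; the front value depends only on k modulo the cycle length.
--     k = max(k, 0)
--     if n % 2:
--         return 2 * (k % ((n + 1) // 2)) + 1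
--     j = k % n
--     return 2 * j + 1 if j < n // 2 else 2 * j - n + 2
-- ===== Notes on version B (the rewrite author's own statement) =====
-- stated objective: faster
-- what changed: Replaces the k-step deque simulation by an O(1) closed form: each op rotates positions by 2 with a swap at the wrap, so the front is periodic in k ((n+1)/2 for odd n, n for even n) and is computed by one modular formula.
import Mathlib
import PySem

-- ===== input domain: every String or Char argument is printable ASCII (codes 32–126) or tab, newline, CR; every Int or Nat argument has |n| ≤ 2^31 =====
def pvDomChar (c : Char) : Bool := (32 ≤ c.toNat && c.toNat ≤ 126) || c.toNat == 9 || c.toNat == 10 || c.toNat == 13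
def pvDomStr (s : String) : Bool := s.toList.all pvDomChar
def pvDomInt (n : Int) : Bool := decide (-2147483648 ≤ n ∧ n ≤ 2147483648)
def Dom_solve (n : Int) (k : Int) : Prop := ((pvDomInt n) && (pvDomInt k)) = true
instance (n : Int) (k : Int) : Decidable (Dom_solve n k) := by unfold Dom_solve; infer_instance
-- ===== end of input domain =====

-- B replaces A's O(k) deque simulation by an O(1) modular closed form for the front element.

-- ===== PORT A =====
-- literal port: collections.deque is ported as the standard two-list queue
-- (front list, reversed back list), so popleft and append are the deque's O(1) ops.
def dqPopleft? (q : List Int × List Int) : Option (Int × (List Int × List Int)) :=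
  match q with
  | (x :: f, b) => some (x, (f, b))
  | ([], b) =>
    match b.reverse with
    | x :: f => some (x, (f, []))
    | [] => none                       -- popleft from empty deque: IndexError

-- one loop iteration: n1 = popleft(); n2 = popleft(); append(n2); append(n1)
def dqStep (q : List Int × List Int) : List Int × List Int :=
  match dqPopleft? q with
  | none => q                          -- IndexError in Python; excluded by Pre_solve
  | some (n1, q1) =>
    match dqPopleft? q1 with
    | none => q1                       -- IndexError in Python; excluded by Pre_solve
    | some (n2, q2) => (q2.1, n1 :: n2 :: q2.2)

def solve (n : Int) (k : Int) : Int :=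
  let queue : List Int × List Int := (PySem.List.pyRange 1 (n + 1) 1, [])
  let queue := (PySem.List.pyRange 0 k 1).foldl (fun q _ => dqStep q) queue
  match dqPopleft? queue with
  | some (x, _) => x
  | none => 0                          -- IndexError in Python; excluded by Pre_solve

-- ===== PORT B =====
def solve_alt (n : Int) (k : Int) : Int :=
  let k' := max k 0
  if PySem.Int.mod n 2 ≠ 0 then
    2 * PySem.Int.mod k' (PySem.Int.floordiv (n + 1) 2) + 1
  else
    let j := PySem.Int.mod k' n
    if j < PySem.Int.floordiv n 2 then 2 * j + 1 else 2 * j - n + 2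

-- ===== PRECONDITION & SPEC =====
-- Pre_ excludes exactly the inputs where A raises IndexError: n < 1 (empty deque at the
-- final popleft) and n = 1 with k ≥ 1 (popping two elements from a one-element deque).
def Pre_solve (n : Int) (k : Int) : Prop := 1 ≤ n ∧ (1 ≤ k → 2 ≤ n)
instance (n : Int) (k : Int) : Decidable (Pre_solve n k) := by unfold Pre_solve; infer_instance
def pvWitness_solve : Int × Int := (6, 4)

def Spec_solve (n : Int) (k : Int) (out : Int) : Prop := out = solve_alt n k
instance (n : Int) (k : Int) (out : Int) : Decidable (Spec_solve n k out) := by unfold Spec_solve; infer_instance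

-- ===== CLAIM (what is proved, stated in full; the proofs are below) =====
def Claim_equal_solve : Prop := ∀ (n : Int) (k : Int), Dom_solve n k → Pre_solve n k → Spec_solve n k (solve n k)

-- ===== LEMMAS AND PROOFS =====

-- the loop body of A
def fzOp (q : List Int) : List Int :=
  match q with
  | n1 :: n2 :: rest => rest ++ [n2, n1]
  | _ => q

-- position-index map for even N (cycle order 0, n-1, n-3, ..., 1, n-2, ..., 2)
def fzCE (N p : Nat) : Nat := if p % 2 = 0 then p / 2 else (p + N - 1) / 2

-- value sitting at position p after i ops, starting from [1, ..., N]
def fzVal (N i p : Nat) : Int :=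
  if N % 2 = 0 then
    let j := (fzCE N p + i) % N
    if j < N / 2 then 2 * (j : Int) + 1 else 2 * (j : Int) - (N : Int) + 2
  else
    if p % 2 = 0 then 2 * (((p / 2 + i) % ((N + 1) / 2) : Nat) : Int) + 1
    else 2 * (((p / 2 + i) % ((N - 1) / 2) : Nat) : Int) + 2

def fzState (N i : Nat) : List Int := (List.range N).map (fzVal N i)

theorem fzVal_zero (N p : Nat) (hp : p < N) : fzVal N 0 p = 1 + (p : Int) := by
  obtain ⟨a, rfl⟩ | ⟨a, rfl⟩ := Nat.even_or_odd N <;>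
    obtain ⟨b, rfl⟩ | ⟨b, rfl⟩ := Nat.even_or_odd p
  · have h2 : (b + b) / 2 + 0 = b := by omega
    have h3 : b % (a + a) = b := Nat.mod_eq_of_lt (by omega)
    simp only [fzVal, fzCE, if_pos (by omega : (a + a) % 2 = 0),
      if_pos (by omega : (b + b) % 2 = 0), h2, h3, if_pos (by omega : b < (a + a) / 2)]
    push_cast; ring
  · have h2 : (2 * b + 1 + (a + a) - 1) / 2 + 0 = b + a := by omega
    have h3 : (b + a) % (a + a) = b + a := Nat.mod_eq_of_lt (by omega)
    simp only [fzVal, fzCE, if_pos (by omega : (a + a) % 2 = 0),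
      if_neg (by omega : ¬ (2 * b + 1) % 2 = 0), h2, h3,
      if_neg (by omega : ¬ b + a < (a + a) / 2)]
    push_cast; ring
  · have h2 : (b + b) / 2 + 0 = b := by omega
    have h3 : b % ((2 * a + 1 + 1) / 2) = b := Nat.mod_eq_of_lt (by omega)
    simp only [fzVal, if_neg (by omega : ¬ (2 * a + 1) % 2 = 0),
      if_pos (by omega : (b + b) % 2 = 0), h2, h3]
    push_cast; ring
  · have h2 : (2 * b + 1) / 2 + 0 = b := by omega
    have h3 : b % ((2 * a + 1 - 1) / 2) = b := Nat.mod_eq_of_lt (by omega)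
    simp only [fzVal, if_neg (by omega : ¬ (2 * a + 1) % 2 = 0),
      if_neg (by omega : ¬ (2 * b + 1) % 2 = 0), h2, h3]
    push_cast; ring

theorem fzVal_shift (N i p : Nat) (hp : p + 2 < N) :
    fzVal N (i + 1) p = fzVal N i (p + 2) := by
  obtain ⟨a, rfl⟩ | ⟨a, rfl⟩ := Nat.even_or_odd N <;>
    obtain ⟨b, rfl⟩ | ⟨b, rfl⟩ := Nat.even_or_odd p
  · simp only [fzVal, fzCE, if_pos (by omega : (a + a) % 2 = 0),
      if_pos (by omega : (b + b) % 2 = 0), if_pos (by omega : (b + b + 2) % 2 = 0)]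
    rw [show (b + b) / 2 + (i + 1) = (b + b + 2) / 2 + i by omega]
  · simp only [fzVal, fzCE, if_pos (by omega : (a + a) % 2 = 0),
      if_neg (by omega : ¬ (2 * b + 1) % 2 = 0), if_neg (by omega : ¬ (2 * b + 1 + 2) % 2 = 0)]
    rw [show (2 * b + 1 + (a + a) - 1) / 2 + (i + 1) = (2 * b + 1 + 2 + (a + a) - 1) / 2 + i
      by omega]
  · simp only [fzVal, if_neg (by omega : ¬ (2 * a + 1) % 2 = 0),
      if_pos (by omega : (b + b) % 2 = 0), if_pos (by omega : (b + b + 2) % 2 = 0)]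
    rw [show (b + b) / 2 + (i + 1) = (b + b + 2) / 2 + i by omega]
  · simp only [fzVal, if_neg (by omega : ¬ (2 * a + 1) % 2 = 0),
      if_neg (by omega : ¬ (2 * b + 1) % 2 = 0), if_neg (by omega : ¬ (2 * b + 1 + 2) % 2 = 0)]
    rw [show (2 * b + 1) / 2 + (i + 1) = (2 * b + 1 + 2) / 2 + i by omega]

theorem fzVal_wrap1 (N i : Nat) (hN : 2 ≤ N) :
    fzVal N (i + 1) (N - 2) = fzVal N i 1 := by
  obtain ⟨a, rfl⟩ | ⟨a, rfl⟩ := Nat.even_or_odd N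
  · simp only [fzVal, fzCE, if_pos (by omega : (a + a) % 2 = 0),
      if_pos (by omega : (a + a - 2) % 2 = 0), if_neg (by omega : ¬ (1 : Nat) % 2 = 0)]
    rw [show (a + a - 2) / 2 + (i + 1) = (1 + (a + a) - 1) / 2 + i by omega]
  · simp only [fzVal, if_neg (by omega : ¬ (2 * a + 1) % 2 = 0),
      if_neg (by omega : ¬ (2 * a + 1 - 2) % 2 = 0), if_neg (by omega : ¬ (1 : Nat) % 2 = 0)]
    rw [show (2 * a + 1 - 1) / 2 = a by omega,
      show (2 * a + 1 - 2) / 2 + (i + 1) = a + i by omega,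
      show (1 : Nat) / 2 + i = i by omega, Nat.add_mod_left]

theorem fzVal_wrap0 (N i : Nat) (hN : 2 ≤ N) :
    fzVal N (i + 1) (N - 1) = fzVal N i 0 := by
  obtain ⟨a, rfl⟩ | ⟨a, rfl⟩ := Nat.even_or_odd N
  · simp only [fzVal, fzCE, if_pos (by omega : (a + a) % 2 = 0),
      if_neg (by omega : ¬ (a + a - 1) % 2 = 0), if_true, Nat.zero_div, Nat.zero_add]
    rw [show (a + a - 1 + (a + a) - 1) / 2 + (i + 1) = (a + a) + i by omega, Nat.add_mod_left]
  · simp only [fzVal, if_neg (by omega : ¬ (2 * a + 1) % 2 = 0),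
      if_pos (by omega : (2 * a + 1 - 1) % 2 = 0), if_true, Nat.zero_div, Nat.zero_add,
      show (2 * a + 1 + 1) / 2 = a + 1 by omega,
      show (2 * a + 1 - 1) / 2 + (i + 1) = a + 1 + i by omega, Nat.add_mod_left]

theorem fzState_step (N i : Nat) (hN : 2 ≤ N) :
    fzOp (fzState N i) = fzState N (i + 1) := by
  have hlen : (fzState N i).length = N := by simp [fzState]
  obtain ⟨a, b, rest, hq⟩ : ∃ a b rest, fzState N i = a :: b :: rest := by
    match h : fzState N i with
    | [] => rw [h] at hlen; simp at hlen; omega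
    | [x] => rw [h] at hlen; simp at hlen; omega
    | a :: b :: rest => exact ⟨a, b, rest, rfl⟩
  have ha : a = fzVal N i 0 := by
    have := congrArg (fun l => l[0]?) hq
    simpa [fzState, List.getElem?_map, List.getElem?_range, (by omega : 0 < N)] using this.symm
  have hb : b = fzVal N i 1 := by
    have := congrArg (fun l => l[1]?) hq
    simpa [fzState, List.getElem?_map, List.getElem?_range, (by omega : 1 < N)] using this.symm
  have hrest : rest = (fzState N i).drop 2 := by rw [hq]; rfl
  rw [hq]; show rest ++ [b, a] = fzState N (i + 1)
  have hrl : rest.length = N - 2 := by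
    have := congrArg List.length hq; simp at this; omega
  apply List.ext_getElem
  · simp [fzState, hrl]; omega
  · intro p hp1 hp2
    have hpN : p < N := by simpa [fzState] using hp2
    have hrhs : (fzState N (i + 1))[p] = fzVal N (i + 1) p := by simp [fzState]
    rw [hrhs]
    by_cases hc : p < rest.length
    · rw [List.getElem_append_left hc, fzVal_shift N i p (by omega)]
      have h1 : rest[p]? = some (fzVal N i (p + 2)) := by
        have hr : (List.range N)[2 + p]? = some (2 + p) := by
          rw [List.getElem?_eq_getElem (by simpa using (show 2 + p < N by omega))]
          simp
        rw [hrest, List.getElem?_drop]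
        unfold fzState
        rw [List.getElem?_map, hr, show 2 + p = p + 2 by omega]
        rfl
      have h2 : rest[p]? = some rest[p] := List.getElem?_eq_getElem hc
      rw [h2] at h1
      exact Option.some.inj h1
    · rw [List.getElem_append_right (by omega)]
      rcases (by omega : p = N - 2 ∨ p = N - 1) with h | h
      · subst h
        have h0 : N - 2 - rest.length = 0 := by omega
        simp only [h0, List.getElem_cons_zero, hb]
        exact (fzVal_wrap1 N i hN).symm
      · subst h
        have h1 : N - 1 - rest.length = 1 := by omega
        simp only [h1, List.getElem_cons_succ, List.getElem_cons_zero, ha]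
        exact (fzVal_wrap0 N i hN).symm

-- the queue seen as a plain list (front ++ reverse back)
def fzToL (q : List Int × List Int) : List Int := q.1 ++ q.2.reverse

theorem fzPop_some (q : List Int × List Int) (x : Int) (t : List Int)
    (h : fzToL q = x :: t) : ∃ q', dqPopleft? q = some (x, q') ∧ fzToL q' = t := by
  obtain ⟨f, b⟩ := q
  cases f with
  | cons y f' =>
      have hy : y = x ∧ f' ++ b.reverse = t := by
        simpa [fzToL] using h
      exact ⟨(f', b), by simp [dqPopleft?, hy.1], by simpa [fzToL] using hy.2⟩
  | nil =>
      have hrev : b.reverse = x :: t := by simpa [fzToL] using h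
      exact ⟨(t, []), by simp [dqPopleft?, hrev], by simp [fzToL]⟩

theorem fzStep_toL (q : List Int × List Int) (a b : Int) (rest : List Int)
    (h : fzToL q = a :: b :: rest) : fzToL (dqStep q) = rest ++ [b, a] := by
  obtain ⟨q1, h1, ht1⟩ := fzPop_some q a (b :: rest) h
  obtain ⟨q2, h2, ht2⟩ := fzPop_some q1 b rest ht1
  obtain ⟨f2, b2⟩ := q2
  simp only [dqStep, h1, h2]
  have ht2' : f2 ++ b2.reverse = rest := by simpa [fzToL] using ht2
  simp [fzToL, ← ht2']

theorem fzState_cons2 (N i : Nat) (hN : 2 ≤ N) :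
    ∃ a b rest, fzState N i = a :: b :: rest := by
  have hlen : (fzState N i).length = N := by simp [fzState]
  match h : fzState N i with
  | [] => rw [h] at hlen; simp at hlen; omega
  | [x] => rw [h] at hlen; simp at hlen; omega
  | a :: b :: rest => exact ⟨a, b, rest, rfl⟩

theorem fzFold_toL (l : List Int) (q : List Int × List Int) (N i : Nat) (hN : 2 ≤ N)
    (h : fzToL q = fzState N i) :
    fzToL (l.foldl (fun q _ => dqStep q) q) = fzState N (i + l.length) := by
  induction l generalizing q i with
  | nil => simpa using h
  | cons x xs ih =>
      simp only [List.foldl_cons, List.length_cons]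
      obtain ⟨a, b, rest, hq⟩ := fzState_cons2 N i hN
      have hstep : fzToL (dqStep q) = fzState N (i + 1) := by
        rw [fzStep_toL q a b rest (by rw [h, hq])]
        have h2 := fzState_step N i hN
        rw [hq] at h2
        simpa [fzOp] using h2
      have := ih (dqStep q) (i + 1) hstep
      rw [show i + (xs.length + 1) = i + 1 + xs.length by omega]
      exact this

theorem fzState_zero_eq (N : Nat) :
    fzState N 0 = (List.range N).map (fun p => (1 : Int) + (p : Nat)) := by
  unfold fzState
  apply List.ext_getElem
  · simp
  · intro p hp1 hp2
    simp only [List.getElem_map, List.getElem_range]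
    exact fzVal_zero N p (by simpa using hp1)

-- the closed form at position 0 equals B's formula, for k ≥ 0
theorem fzVal_head (n k : Int) (hn : 1 ≤ n) (hk : 0 ≤ k) :
    fzVal n.toNat k.toNat 0 = solve_alt n k := by
  have hmax : max k 0 = k := by omega
  have hncast : ((n.toNat : Int)) = n := by omega
  have hkcast : ((k.toNat : Int)) = k := by omega
  have h2c : ((2 : Nat) : Int) = 2 := by norm_num
  by_cases hpar : n.toNat % 2 = 0
  · have hnpar : PySem.Int.mod n 2 = 0 := by
      rw [← hncast, ← h2c, PySem.Int.mod_natCast]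
      exact_mod_cast hpar
    have hmodk : PySem.Int.mod k n = ((k.toNat % n.toNat : Nat) : Int) := by
      rw [← hncast, ← hkcast, PySem.Int.mod_natCast]
      simp
    have hfd : PySem.Int.floordiv n 2 = ((n.toNat / 2 : Nat) : Int) := by
      rw [← hncast, ← h2c, PySem.Int.floordiv_natCast]
      simp
    have hL : fzVal n.toNat k.toNat 0 =
        if k.toNat % n.toNat < n.toNat / 2
        then 2 * ((k.toNat % n.toNat : Nat) : Int) + 1
        else 2 * ((k.toNat % n.toNat : Nat) : Int) - ((n.toNat : Nat) : Int) + 2 := by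
      simp [fzVal, fzCE, hpar]
    have hR : solve_alt n k =
        if ((k.toNat % n.toNat : Nat) : Int) < ((n.toNat / 2 : Nat) : Int)
        then 2 * ((k.toNat % n.toNat : Nat) : Int) + 1
        else 2 * ((k.toNat % n.toNat : Nat) : Int) - n + 2 := by
      unfold solve_alt
      rw [hmax, if_neg (not_not_intro hnpar), hmodk, hfd]
    rw [hL, hR]
    by_cases hlt : k.toNat % n.toNat < n.toNat / 2
    · rw [if_pos hlt, if_pos (by exact_mod_cast hlt)]
    · rw [if_neg hlt, if_neg (by exact_mod_cast hlt), hncast]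
  · have hnpar : PySem.Int.mod n 2 ≠ 0 := by
      rw [← hncast, ← h2c, PySem.Int.mod_natCast]
      intro h
      exact hpar (by exact_mod_cast h)
    have hfd : PySem.Int.floordiv (n + 1) 2 = (((n.toNat + 1) / 2 : Nat) : Int) := by
      rw [show n + 1 = (((n.toNat + 1 : Nat)) : Int) by omega, ← h2c, PySem.Int.floordiv_natCast]
    have hmodk : PySem.Int.mod k (((n.toNat + 1) / 2 : Nat) : Int)
        = ((k.toNat % ((n.toNat + 1) / 2) : Nat) : Int) := by
      rw [← hkcast, PySem.Int.mod_natCast]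
      simp
    have hL : fzVal n.toNat k.toNat 0
        = 2 * ((k.toNat % ((n.toNat + 1) / 2) : Nat) : Int) + 1 := by
      simp [fzVal, hpar]
    rw [hL]
    unfold solve_alt
    rw [hmax, if_pos hnpar, hfd, hmodk]

-- ===== VERDICT (by name: the statement is the Claim_ definition above) =====
theorem solve_spec : Claim_equal_solve := by
  intro n k _ hpre
  obtain ⟨hn1, hnk⟩ := hpre
  show solve n k = solve_alt n k
  by_cases hk : k ≤ 0
  · -- loop body never runs; both sides are 1
    have hA : solve n k = 1 := by
      simp [solve, dqPopleft?, PySem.List.pyRange_one_eq_nil hk,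
        PySem.List.pyRange_one_cons (show (1 : Int) < n + 1 by omega)]
    have hmax : max k 0 = 0 := by omega
    have hB : solve_alt n k = 1 := by
      unfold solve_alt
      rw [hmax]
      by_cases hpar : PySem.Int.mod n 2 = 0
      · have hn2 : 2 ≤ n := by
          by_contra h
          rw [show n = 1 by omega,
            PySem.Int.mod_eq_emod_of_pos (show (0 : Int) < 2 by norm_num)] at hpar
          norm_num at hpar
        rw [if_neg (not_not_intro hpar),
          PySem.Int.mod_eq_emod_of_pos (show (0 : Int) < n by omega), Int.zero_emod]
        rw [if_pos (show (0 : Int) < PySem.Int.floordiv n 2 by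
          rw [PySem.Int.floordiv_eq_ediv_of_pos (show (0 : Int) < 2 by norm_num)]; omega)]
        norm_num
      · have hfdpos : (0 : Int) < PySem.Int.floordiv (n + 1) 2 := by
          rw [PySem.Int.floordiv_eq_ediv_of_pos (show (0 : Int) < 2 by norm_num)]
          omega
        rw [if_pos hpar, PySem.Int.mod_eq_emod_of_pos hfdpos, Int.zero_emod]
        norm_num
    rw [hA, hB]
  · -- k ≥ 1: n ≥ 2, simulate with the closed-form state
    have hn2 : 2 ≤ n := hnk (by omega)
    have hN2 : 2 ≤ n.toNat := by omega
    have hstart : PySem.List.pyRange 1 (n + 1) 1 = fzState n.toNat 0 := by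
      rw [PySem.List.pyRange_one, fzState_zero_eq, show (n + 1 - 1).toNat = n.toNat by omega]
    have hlen : (PySem.List.pyRange 0 k 1).length = k.toNat := by
      rw [PySem.List.length_pyRange_one]
      omega
    have hinit : fzToL (PySem.List.pyRange 1 (n + 1) 1, ([] : List Int)) = fzState n.toNat 0 := by
      simp [fzToL, hstart]
    have hfold := fzFold_toL (PySem.List.pyRange 0 k 1) _ n.toNat 0 hN2 hinit
    rw [hlen, Nat.zero_add] at hfold
    obtain ⟨rest, hrest⟩ : ∃ rest,
        fzState n.toNat k.toNat = fzVal n.toNat k.toNat 0 :: rest := by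
      obtain ⟨M, hM⟩ : ∃ M, n.toNat = M + 1 := ⟨n.toNat - 1, by omega⟩
      refine ⟨((List.range M).map (· + 1)).map (fzVal n.toNat k.toNat), ?_⟩
      rw [fzState, hM, List.range_succ_eq_map, List.map_cons]
    obtain ⟨q', hpop, -⟩ := fzPop_some _ (fzVal n.toNat k.toNat 0) rest (hfold.trans hrest)
    simp only [solve]
    rw [hpop]
    exact fzVal_head n k (by omega) (by omega)
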